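-- pv_equiv track=rewrite | github.com/eaallen/Code-Wars | py/towerdefense.py | getTowerPositions
-- ===== SOURCE A (Python) =====
-- def getTowerPositions(towers, path):
--     tower_positions = {}
--     for key in towers:
--         for i, row in enumerate(path):
--             try:
--                 row.index(key)
--             except:
--                 None
--             else:
--                 tower_positions[key] = [i, row.index(key)]
--     return tower_positions
-- ===== SOURCE B (Python) =====
-- def getTowerPositions(towers, path):
--     # One pass over the grid: per row, a first-occurrence column map for tower
--     # cells (no row.index rescans), then overwrite so the last row wins; output
--     # keys in towers order like A's dict.
--     tset = set(towers)
--     best = {}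
--     for i, row in enumerate(path):
--         cols = {}
--         for j, cell in enumerate(row):
--             if cell in tset and cell not in cols:
--                 cols[cell] = j
--         for key, j in cols.items():
--             best[key] = [i, j]
--     return {key: best[key] for key in towers if key in best}
-- ===== Notes on version B (the rewrite author's own statement) =====
-- stated objective: faster
-- what changed: Instead of A's per-tower full-grid scans with try/except and two row.index calls per hit, B makes a single pass over the grid, building a per-row first-occurrence column dict for tower cells and overwriting into a best dict so the last row wins, then emits results in towers order.
import Mathlib
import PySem

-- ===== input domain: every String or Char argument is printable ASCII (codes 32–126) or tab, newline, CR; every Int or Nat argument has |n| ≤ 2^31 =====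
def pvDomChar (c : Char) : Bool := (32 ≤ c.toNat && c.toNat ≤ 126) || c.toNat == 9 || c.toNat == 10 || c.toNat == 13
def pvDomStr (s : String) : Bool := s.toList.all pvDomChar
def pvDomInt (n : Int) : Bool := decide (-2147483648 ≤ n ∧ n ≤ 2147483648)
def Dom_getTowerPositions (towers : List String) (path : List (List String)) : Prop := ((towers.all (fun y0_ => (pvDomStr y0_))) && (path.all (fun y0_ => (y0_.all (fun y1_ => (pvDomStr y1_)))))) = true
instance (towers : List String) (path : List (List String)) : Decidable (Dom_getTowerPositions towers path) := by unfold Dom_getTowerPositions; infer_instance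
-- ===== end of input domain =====

-- B replaces A's per-tower full-grid rescans by a single pass over the grid with
-- a per-row first-occurrence column dict (objective: faster).

-- ===== PORT A =====
def getTowerPositions (towers : List String) (path : List (List String)) : List (String × List Int) :=
  (towers.foldl (fun (d : PySem.Dict String (List Int)) key =>
      (PySem.List.enumerate path 0).foldl (fun d ir =>
        match PySem.List.index? ir.2 key with
        | none => d                               -- except: pass
        | some j => d.insert key [ir.1, (j : Int)]) d)
    PySem.Dict.empty).items

-- ===== PORT B =====
-- inner loop of B: build the per-row dict of first columns of tower cells
def pvColStep (tset : PySem.Set String) (cols : PySem.Dict String Int) (jc : Int × String) : PySem.Dict String Int :=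
  if tset.contains jc.2 && !(cols.contains jc.2) then cols.insert jc.2 jc.1 else cols

def pvColsRow (tset : PySem.Set String) (row : List String) : PySem.Dict String Int :=
  (PySem.List.enumerate row 0).foldl (pvColStep tset) PySem.Dict.empty

-- per-row step of B: overwrite best[key] = [i, j] for each (key, j) in cols
def pvRowStep (tset : PySem.Set String) (best : PySem.Dict String (List Int)) (ir : Int × List String) : PySem.Dict String (List Int) :=
  (pvColsRow tset ir.2).items.foldl (fun b kv => b.insert kv.1 [ir.1, kv.2]) best

def getTowerPositions_alt (towers : List String) (path : List (List String)) : List (String × List Int) :=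
  let tset := PySem.Set.ofList towers
  let best := (PySem.List.enumerate path 0).foldl (pvRowStep tset) PySem.Dict.empty
  (towers.foldl (fun (d : PySem.Dict String (List Int)) key =>
      match best.get? key with
      | some v => d.insert key v
      | none => d)
    PySem.Dict.empty).items

-- ===== PRECONDITION & SPEC =====
def Spec_getTowerPositions (towers : List String) (path : List (List String)) (out : List (String × List Int)) : Prop := out = getTowerPositions_alt towers path
instance (towers : List String) (path : List (List String)) (out : List (String × List Int)) : Decidable (Spec_getTowerPositions towers path out) := by unfold Spec_getTowerPositions; infer_instance

-- ===== CLAIM (what is proved, stated in full; the proofs are below) =====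
def Claim_equal_getTowerPositions : Prop := ∀ (towers : List String) (path : List (List String)), Dom_getTowerPositions towers path → Spec_getTowerPositions towers path (getTowerPositions towers path)

-- ===== LEMMAS AND PROOFS =====

-- "last row containing key wins, with its first column" as a fold over enumerated rows
def pvFindStep (key : String) (acc : Option (List Int)) (ir : Int × List String) : Option (List Int) :=
  match PySem.List.index? ir.2 key with
  | none => acc
  | some j => some [ir.1, (j : Int)]

-- apply an optional found value to the accumulating dict
def pvApp (d : PySem.Dict String (List Int)) (key : String) : Option (List Int) → PySem.Dict String (List Int)
  | none => d
  | some v => d.insert key v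

-- A's inner loop over the rows is pvApp of the pvFindStep fold
theorem pvA_inner (key : String) : ∀ (l : List (Int × List String)) (d : PySem.Dict String (List Int)) (acc : Option (List Int)),
    l.foldl (fun d ir =>
        match PySem.List.index? ir.2 key with
        | none => d
        | some j => d.insert key [ir.1, (j : Int)]) (pvApp d key acc)
      = pvApp d key (l.foldl (pvFindStep key) acc) := by
  intro l
  induction l with
  | nil => intro d acc; rfl
  | cons ir rest ih =>
    intro d acc
    have hstep : (match PySem.List.index? ir.2 key with
        | none => pvApp d key acc
        | some j => (pvApp d key acc).insert key [ir.1, (j : Int)])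
        = pvApp d key (pvFindStep key acc ir) := by
      rcases h : PySem.List.index? ir.2 key with _ | j
      · simp only [pvFindStep, h]
      · simp only [pvFindStep, h]
        cases acc with
        | none => rfl
        | some v => simp only [pvApp, PySem.Dict.insert_insert_self]
    rw [List.foldl_cons, List.foldl_cons, hstep]
    exact ih d _

-- monotonicity: a key already in cols is never overwritten by pvColStep folds
theorem pvCols_mono (tset : PySem.Set String) (key : String) (v : Int) :
    ∀ (row : List String) (s : Int) (cols : PySem.Dict String Int), cols.get? key = some v →
      ((PySem.List.enumerate row s).foldl (pvColStep tset) cols).get? key = some v := by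
  intro row
  induction row with
  | nil => intro s cols h; simpa [PySem.List.enumerate_nil]
  | cons c rest ih =>
    intro s cols h
    rw [PySem.List.enumerate_cons, List.foldl_cons]
    apply ih
    unfold pvColStep
    dsimp only
    split
    · next hguard =>
      have hne : key ≠ c := by
        intro hkc; subst hkc
        have : cols.contains key = true := by
          rw [PySem.Dict.contains_eq_isSome_get?, h]; rfl
        simp [this] at hguard
      rw [PySem.Dict.get?_insert_of_ne _ _ hne]; exact h
    · exact h

-- characterisation of cols.get? for a key not yet present
theorem pvCols_get (tset : PySem.Set String) (key : String) :
    ∀ (row : List String) (s : Int) (cols : PySem.Dict String Int), cols.get? key = none →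
      ((PySem.List.enumerate row s).foldl (pvColStep tset) cols).get? key
        = if tset.contains key = true then (PySem.List.index? row key).map (fun j => s + (j : Int)) else none := by
  intro row
  induction row with
  | nil =>
    intro s cols h
    rw [PySem.List.enumerate_nil, List.foldl_nil, h]
    rcases tset.contains key <;> rfl
  | cons c rest ih =>
    intro s cols h
    rw [PySem.List.enumerate_cons, List.foldl_cons]
    by_cases hkc : key = c
    · subst hkc
      by_cases ht : tset.contains key = true
      · have hnc : cols.contains key = false := by
          rw [PySem.Dict.contains_eq_isSome_get?, h]; rfl
        have hstep : pvColStep tset cols (s, key) = cols.insert key s := by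
          unfold pvColStep
          dsimp only
          rw [ht, hnc]
          rfl
        rw [hstep, pvCols_mono tset key s rest (s + 1) _ (PySem.Dict.get?_insert_self _ _ _)]
        rw [if_pos ht, PySem.List.index?_cons_self]
        simp
      · have htf : tset.contains key = false := by
          rcases hx : tset.contains key
          · rfl
          · exact absurd hx ht
        have hstep : pvColStep tset cols (s, key) = cols := by
          unfold pvColStep
          dsimp only
          rw [htf]
          rfl
        rw [hstep, ih (s + 1) cols h, if_neg ht, if_neg ht]
    · have hget : (pvColStep tset cols (s, c)).get? key = none := by
        unfold pvColStep
        dsimp only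
        split
        · rw [PySem.Dict.get?_insert_of_ne _ _ hkc]; exact h
        · exact h
      rw [ih (s + 1) _ hget]
      rw [PySem.List.index?_cons_of_ne rest (fun hce => hkc hce.symm)]
      by_cases ht : tset.contains key = true
      · rw [if_pos ht, if_pos ht]
        rcases PySem.List.index? rest key with _ | j
        · rfl
        · simp
          ring
      · rw [if_neg ht, if_neg ht]

-- cols keys stay Nodup through the pvColStep fold
theorem pvCols_nodup (tset : PySem.Set String) :
    ∀ (row : List String) (s : Int) (cols : PySem.Dict String Int), cols.keys.Nodup →
      ((PySem.List.enumerate row s).foldl (pvColStep tset) cols).keys.Nodup := by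
  intro row
  induction row with
  | nil => intro s cols h; simpa [PySem.List.enumerate_nil]
  | cons c rest ih =>
    intro s cols h
    rw [PySem.List.enumerate_cons, List.foldl_cons]
    apply ih
    unfold pvColStep
    dsimp only
    split
    · next hguard =>
      have hnc : cols.contains c = false := by
        rcases hc : cols.contains c with _ | _
        · rfl
        · simp [hc] at hguard
      rw [PySem.Dict.keys_insert_of_not_contains _ _ hnc]
      have hcm : c ∉ cols.keys := by
        intro hmem
        have := (PySem.Dict.contains_iff_mem_keys cols c).mpr hmem
        rw [this] at hnc
        cases hnc
      simp [List.nodup_append, h]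
      exact fun a ha hac => hcm (hac ▸ ha)
    · exact h

-- folding inserts over an association list with distinct keys, read back through get?
theorem pvItems_fold (i : Int) (key : String) :
    ∀ (l : List (String × Int)) (best : PySem.Dict String (List Int)), (l.map (·.1)).Nodup →
      (l.foldl (fun b kv => b.insert kv.1 [i, kv.2]) best).get? key
        = match (PySem.Dict.mk l).get? key with
          | some j => some [i, j]
          | none => best.get? key := by
  intro l
  induction l with
  | nil => intro best _; rfl
  | cons kv rest ih =>
    intro best hnd
    simp only [List.map_cons, List.nodup_cons] at hnd
    rw [List.foldl_cons, ih _ hnd.2, PySem.Dict.get?_mk_cons]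
    by_cases hk : kv.1 = key
    · have hnone : (PySem.Dict.mk rest).get? key = none := by
        rw [PySem.Dict.get?_eq_none_iff_not_mem_keys]
        simpa [PySem.Dict.keys, hk] using hnd.1
      simp [hk, hnone, PySem.Dict.get?_insert_self]
    · simp only [beq_iff_eq, hk, if_false]
      rcases (PySem.Dict.mk rest).get? key with _ | j
      · simp [PySem.Dict.get?_insert_of_ne _ _ (fun h => hk h.symm)]
      · rfl

-- B's best dict, read at a tower key, is the pvFindStep fold
theorem pvB_best (tset : PySem.Set String) (key : String) (htk : tset.contains key = true) :
    ∀ (path : List (List String)) (s : Int) (best : PySem.Dict String (List Int)),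
      ((PySem.List.enumerate path s).foldl (pvRowStep tset) best).get? key
        = (PySem.List.enumerate path s).foldl (pvFindStep key) (best.get? key) := by
  intro path
  induction path with
  | nil => intro s best; simp [PySem.List.enumerate_nil]
  | cons row rest ih =>
    intro s best
    rw [PySem.List.enumerate_cons, List.foldl_cons, List.foldl_cons, ih]
    congr 1
    have hnd : (pvColsRow tset row).keys.Nodup := by
      apply pvCols_nodup
      simp [PySem.Dict.keys_empty]
    have hitems : ((pvColsRow tset row).items.map (·.1)).Nodup := hnd
    rw [show pvRowStep tset best (s, row)
          = (pvColsRow tset row).items.foldl (fun b kv => b.insert kv.1 [s, kv.2]) best from rfl]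
    rw [pvItems_fold s key _ best hitems]
    have hcols : (PySem.Dict.mk (pvColsRow tset row).items).get? key
        = (PySem.List.index? row key).map (fun j => (0 : Int) + (j : Int)) := by
      have h0 := pvCols_get tset key row 0 PySem.Dict.empty (PySem.Dict.get?_empty key)
      exact h0.trans (if_pos htk)
    rw [hcols]
    unfold pvFindStep
    rcases PySem.List.index? row key with _ | j
    · rfl
    · simp

-- ===== VERDICT (by name: the statement is the Claim_ definition above) =====
theorem getTowerPositions_spec : Claim_equal_getTowerPositions := by
  intro towers path _
  unfold Spec_getTowerPositions getTowerPositions getTowerPositions_alt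
  congr 1
  apply PySem.List.foldl_congr_mem
  intro d key hmem
  have htk : (PySem.Set.ofList towers).contains key = true := by
    rw [PySem.Set.contains_iff]
    exact (PySem.Set.mem_ofList towers key).mpr hmem
  rw [pvB_best (PySem.Set.ofList towers) key htk path 0 PySem.Dict.empty]
  have hA := pvA_inner key (PySem.List.enumerate path 0) d none
  simp only [pvApp] at hA
  rw [hA, PySem.Dict.get?_empty]
  rcases (PySem.List.enumerate path 0).foldl (pvFindStep key) none with _ | v
  · rfl
  · rfl
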